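-- pv_equiv track=rewrite | github.com/orions-stardom/aoc-2025 | day_03.py | smart_max_joltage
-- ===== SOURCE A (Python) =====
-- def smart_max_joltage(bank, n):
--     max_so_far = 0
--     bank = [int(b) for b in bank]
--     for m in range(n, 0, -1):
--         # Choose the maximum single joltage battery we can such that
--         # there are still at least m-1 remaining to choose from
--         cands = bank[:-m+1] if m > 1 else bank
--         i, pick = max(enumerate(cands), key=lambda ix: ix[1])
--         bank = bank[i+1:]
--         assert len(bank) >= m-1
--         max_so_far = 10*max_so_far + pick
--
--     return max_so_far
-- ===== SOURCE B (Python) =====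
-- def smart_max_joltage(bank, n):
--     # One-pass monotonic stack: keep the lexicographically largest subsequence,
--     # discarding at most len(bank)-n smaller elements; read off the first n.
--     if n <= 0:
--         return 0
--     vals = [int(b) for b in bank]
--     drop = len(vals) - n
--     stack = []
--     for v in vals:
--         while stack and drop > 0 and stack[-1] < v:
--             stack.pop()
--             drop -= 1
--         stack.append(v)
--     out = 0
--     for i in range(n):
--         out = 10 * out + stack[i]
--     return out
-- ===== Notes on version B (the rewrite author's own statement) =====
-- stated objective: faster
-- what changed: Replaced A's n rounds of re-scanning the remaining bank for its maximum (rebuilding the list each round) by a single left-to-right monotonic-stack pass that discards at most len(bank)-n smaller elements and reads off the first n of the stack.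
import Mathlib
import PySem

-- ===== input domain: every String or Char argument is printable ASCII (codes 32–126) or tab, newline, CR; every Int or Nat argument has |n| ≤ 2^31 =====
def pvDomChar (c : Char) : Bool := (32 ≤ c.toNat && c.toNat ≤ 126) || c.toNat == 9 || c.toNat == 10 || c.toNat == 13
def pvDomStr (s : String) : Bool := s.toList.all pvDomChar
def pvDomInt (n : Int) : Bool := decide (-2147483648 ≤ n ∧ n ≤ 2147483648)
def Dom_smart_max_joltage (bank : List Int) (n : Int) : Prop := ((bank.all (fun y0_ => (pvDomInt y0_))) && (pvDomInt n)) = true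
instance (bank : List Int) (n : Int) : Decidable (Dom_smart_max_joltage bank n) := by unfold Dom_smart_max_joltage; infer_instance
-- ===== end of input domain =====

-- B replaces A's n rounds of rescanning the remaining bank by a single
-- monotonic-stack pass that discards at most len(bank)-n smaller elements.

-- ===== PORT A =====
-- one iteration of A's 'for m in range(n, 0, -1)' loop; state none = an exception was raised
def pvStepA (st : Option (Int × List Int)) (m : Int) : Option (Int × List Int) :=
  match st with
  | none => none
  | some (acc, bk) =>
    let cands := if m > 1 then PySem.List.slice bk none (some (-m + 1)) else bk
    match PySem.List.max? (PySem.List.enumerate cands 0) (fun ix => ix.2) with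
    | none => none
    | some (i, pick) => some (10 * acc + pick, PySem.List.slice bk (some (i + 1)) none)

def smart_max_joltage (bank : List Int) (n : Int) : Int :=
  match (PySem.List.pyRange n 0 (-1)).foldl pvStepA (some (0, bank)) with
  | some (acc, _) => acc
  | none => 0

-- ===== PORT B =====
-- the 'while stack and drop > 0 and stack[-1] < v' loop; the stack is kept head = top
def pvPopB (st : List Int) (drop : Int) (v : Int) : List Int × Int :=
  match st with
  | [] => ([], drop)
  | t :: s => if drop > 0 ∧ t < v then pvPopB s (drop - 1) v else (t :: s, drop)

-- one iteration of B's 'for v in vals' loop: pop, then push v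
def pvStepB (p : List Int × Int) (v : Int) : List Int × Int :=
  (v :: (pvPopB p.1 p.2 v).1, (pvPopB p.1 p.2 v).2)

-- the final 'for i in range(n): out = 10*out + stack[i]' loop; stack[i] raises IndexError
-- outside Pre_, modelled by pyGetD's default (never reached inside Pre_)
def smart_max_joltage_alt (bank : List Int) (n : Int) : Int :=
  if n ≤ 0 then 0
  else
    let fin := bank.foldl pvStepB ([], (bank.length : Int) - n)
    (PySem.List.pyRange 0 n 1).foldl (fun out i => 10 * out + PySem.List.pyGetD fin.1.reverse i 0) 0

-- ===== PRECONDITION & SPEC =====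
-- When 1 ≤ n and the bank has fewer than n batteries, A raises ValueError (max of an
-- empty sequence) and B raises IndexError; those inputs are excluded.
def Pre_smart_max_joltage (bank : List Int) (n : Int) : Prop := n ≤ 0 ∨ n ≤ (bank.length : Int)
instance (bank : List Int) (n : Int) : Decidable (Pre_smart_max_joltage bank n) := by
  unfold Pre_smart_max_joltage; infer_instance
def pvWitness_smart_max_joltage : List Int × Int := ([3, 1, 2], 2)

def Spec_smart_max_joltage (bank : List Int) (n : Int) (out : Int) : Prop := out = smart_max_joltage_alt bank n
instance (bank : List Int) (n : Int) (out : Int) : Decidable (Spec_smart_max_joltage bank n out) := by unfold Spec_smart_max_joltage; infer_instance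

-- ===== CLAIM (what is proved, stated in full; the proofs are below) =====
def Claim_equal_smart_max_joltage : Prop := ∀ (bank : List Int) (n : Int), Dom_smart_max_joltage bank n → Pre_smart_max_joltage bank n → Spec_smart_max_joltage bank n (smart_max_joltage bank n)

-- ===== LEMMAS AND PROOFS =====

def pvFamAux (q : Int × Int) : Int → List Int → Int × Int
  | _, [] => q
  | i, x :: xs => if q.2 < x then pvFamAux (i, x) (i + 1) xs else pvFamAux q (i + 1) xs

def pvFam : List Int → Option (Int × Int)
  | [] => none
  | x :: t => some (pvFamAux (0, x) 1 t)

lemma pvFam_foldl (t : List Int) : ∀ (q : Int × Int) (s : Int),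
    List.foldl (fun (acc : Option (Int × Int)) (x : Int × Int) =>
        match acc with
        | none => some x
        | some m => if m.2 < x.2 then some x else some m)
      (some q) (PySem.List.enumerate t s) = some (pvFamAux q s t) := by
  induction t with
  | nil => intro q s; simp [PySem.List.enumerate_nil, pvFamAux]
  | cons x xs ih =>
    intro q s
    rw [PySem.List.enumerate_cons, List.foldl_cons]
    by_cases h : q.2 < x <;> simp [pvFamAux, h, ih]

lemma pvMax_eq_fam (w : List Int) :
    PySem.List.max? (PySem.List.enumerate w 0) (fun ix => ix.2) = pvFam w := by
  cases w with
  | nil => simp [PySem.List.max?, PySem.List.enumerate_nil, pvFam]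
  | cons x t =>
    have h := pvFam_foldl t (0, x) 1
    unfold PySem.List.max? pvFam
    rw [PySem.List.enumerate_cons, List.foldl_cons]
    show List.foldl _ (some ((0 : Int), x)) (PySem.List.enumerate t (0 + 1)) = _
    norm_num
    convert h using 2
    funext acc y
    cases acc <;> rfl

lemma pvFamAux_spec (xs : List Int) : ∀ (bi bv i : Int),
    bv ≤ (pvFamAux (bi, bv) i xs).2 ∧ (∀ x ∈ xs, x ≤ (pvFamAux (bi, bv) i xs).2) ∧
    (pvFamAux (bi, bv) i xs = (bi, bv) ∨
      ∃ p s, xs = p ++ (pvFamAux (bi, bv) i xs).2 :: s ∧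
        (pvFamAux (bi, bv) i xs).1 = i + p.length ∧
        (∀ x ∈ p, x < (pvFamAux (bi, bv) i xs).2) ∧ bv < (pvFamAux (bi, bv) i xs).2) := by
  induction xs with
  | nil => intro bi bv i; simp [pvFamAux]
  | cons x t ih =>
    intro bi bv i
    by_cases h : bv < x
    · simp only [pvFamAux, if_pos h]
      obtain ⟨h1, h2, h3⟩ := ih i x (i + 1)
      refine ⟨le_trans (le_of_lt h) h1, ?_, ?_⟩
      · intro y hy
        rcases List.mem_cons.mp hy with hy | hy
        · exact hy ▸ h1
        · exact h2 y hy
      · right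
        rcases h3 with heq | ⟨p, s, hps, hidx, hlt, hbv⟩
        · refine ⟨[], t, ?_, ?_, ?_, ?_⟩
          · rw [heq]; simp
          · rw [heq]; simp
          · simp
          · rw [heq]; exact h
        · refine ⟨x :: p, s, ?_, ?_, ?_, ?_⟩
          · rw [List.cons_append]; exact congrArg (List.cons x) hps
          · rw [hidx]; simp only [List.length_cons]; push_cast; ring
          · intro y hy
            rcases List.mem_cons.mp hy with hy | hy
            · exact hy ▸ hbv
            · exact hlt y hy
          · exact lt_trans h hbv
    · simp only [pvFamAux, if_neg h]
      obtain ⟨h1, h2, h3⟩ := ih bi bv (i + 1)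
      refine ⟨h1, ?_, ?_⟩
      · intro y hy
        rcases List.mem_cons.mp hy with hy | hy
        · exact hy ▸ le_trans (le_of_not_gt h) h1
        · exact h2 y hy
      · rcases h3 with heq | ⟨p, s, hps, hidx, hlt, hbv⟩
        · left; exact heq
        · right
          refine ⟨x :: p, s, ?_, ?_, ?_, ?_⟩
          · rw [List.cons_append]; exact congrArg (List.cons x) hps
          · rw [hidx]; simp only [List.length_cons]; push_cast; ring
          · intro y hy
            rcases List.mem_cons.mp hy with hy | hy
            · exact hy ▸ lt_of_le_of_lt (le_of_not_gt h) hbv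
            · exact hlt y hy
          · exact hbv

lemma pvFam_spec {w : List Int} {i m : Int} (h : pvFam w = some (i, m)) :
    ∃ pre suf, w = pre ++ m :: suf ∧ i = (pre.length : Int) ∧
      (∀ y ∈ pre, y < m) ∧ (∀ y ∈ w, y ≤ m) := by
  cases w with
  | nil => simp [pvFam] at h
  | cons x t =>
    simp only [pvFam, Option.some.injEq] at h
    obtain ⟨h1, h2, h3⟩ := pvFamAux_spec t 0 x 1
    rw [h] at h1 h2 h3
    rcases h3 with heq | ⟨p, s, hps, hidx, hlt, hbv⟩
    · rw [Prod.mk.injEq] at heq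
      obtain ⟨hi, hm⟩ := heq
      refine ⟨[], t, ?_, ?_, ?_, ?_⟩
      · rw [hm]; simp
      · simp [hi]
      · simp
      · intro y hy
        rcases List.mem_cons.mp hy with hy | hy
        · exact hy ▸ (hm ▸ le_refl m)
        · simpa using h2 y hy
    · refine ⟨x :: p, s, ?_, ?_, ?_, ?_⟩
      · rw [List.cons_append]; exact congrArg (List.cons x) hps
      · simp only [List.length_cons] at *; push_cast at hidx ⊢; omega
      · intro y hy
        rcases List.mem_cons.mp hy with hy | hy
        · exact hy ▸ hbv
        · exact hlt y hy
      · intro y hy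
        rcases List.mem_cons.mp hy with hy | hy
        · exact hy ▸ le_of_lt hbv
        · exact h2 y hy

lemma pvFam_isSome {w : List Int} (h : w ≠ []) : ∃ p, pvFam w = some p := by
  cases w with
  | nil => exact absurd rfl h
  | cons x t => exact ⟨_, rfl⟩

def pvGre : List Int → Nat → List Int
  | _, 0 => []
  | xs, (k+1) =>
    match pvFam (xs.take (xs.length - k)) with
    | none => []
    | some (i, m) => m :: pvGre (xs.drop (i.toNat + 1)) k

def pvDig (acc : Int) (l : List Int) : Int := l.foldl (fun a v => 10 * a + v) acc

lemma pvCands_eq (bk : List Int) (k : Nat) :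
    (if ((k:Int)+1) > 1 then PySem.List.slice bk none (some (-((k:Int)+1) + 1)) else bk) =
      bk.take (bk.length - k) := by
  rcases Nat.eq_zero_or_pos k with hk | hk
  · subst hk; norm_num
  · rw [if_pos (by omega)]
    have : -((k:Int)+1) + 1 = -(k:Int) := by ring
    rw [this, PySem.List.slice_to_neg_natCast bk k hk]

lemma pvLemA : ∀ (k : Nat) (bank : List Int) (acc : Int), k ≤ bank.length →
    ∃ rest, (PySem.List.pyRange (k : Int) 0 (-1)).foldl pvStepA (some (acc, bank)) =
      some (pvDig acc (pvGre bank k), rest) := by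
  intro k
  induction k with
  | zero => intro bank acc _; exact ⟨bank, by simp [PySem.List.pyRange_neg_one_eq_nil, pvGre, pvDig]⟩
  | succ k ih =>
    intro bank acc hlen
    rw [show ((k+1 : Nat) : Int) = (k:Int)+1 by push_cast; ring]
    rw [PySem.List.pyRange_neg_one_cons (by positivity), List.foldl_cons]
    have hwne : bank.take (bank.length - k) ≠ [] := by
      intro hcon
      rcases List.take_eq_nil_iff.mp hcon with h | h
      · omega
      · subst h; simp at hlen
    obtain ⟨⟨i, m⟩, hfam⟩ := pvFam_isSome hwne
    obtain ⟨pre, suf, hw, hi, hpre, hmax⟩ := pvFam_spec hfam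
    have hstep : pvStepA (some (acc, bank)) ((k:Int)+1) =
        some (10 * acc + m, bank.drop (pre.length + 1)) := by
      show (match PySem.List.max? (PySem.List.enumerate (if ((k:Int)+1) > 1 then PySem.List.slice bank none (some (-((k:Int)+1) + 1)) else bank) 0) (fun ix => ix.2) with
            | none => none
            | some (i, pick) => some (10 * acc + pick, PySem.List.slice bank (some (i + 1)) none)) = _
      rw [pvCands_eq bank k, pvMax_eq_fam, hfam]
      simp only [hi]
      rw [show ((pre.length : Int) + 1) = ((pre.length + 1 : Nat) : Int) by push_cast; ring]
      rw [PySem.List.slice_from_natCast]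
    rw [show ((k:Int)+1-1) = (k:Int) by ring, hstep]
    have hplen : pre.length + 1 ≤ bank.length - k := by
      have h1 : (bank.take (bank.length - k)).length = bank.length - k := by
        rw [List.length_take]; omega
      have h2 : pre.length < (bank.take (bank.length - k)).length := by
        rw [hw]; simp
      omega
    have hlen' : k ≤ (bank.drop (pre.length + 1)).length := by
      simp [List.length_drop]; omega
    obtain ⟨rest, hrec⟩ := ih (bank.drop (pre.length + 1)) (10 * acc + m) hlen'
    refine ⟨rest, ?_⟩
    rw [hrec]
    have hgre : pvGre bank (k+1) = m :: pvGre (bank.drop (pre.length + 1)) k := by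
      show (match pvFam (bank.take (bank.length - k)) with
            | none => []
            | some (i, m) => m :: pvGre (bank.drop (i.toNat + 1)) k) = _
      rw [hfam]
      simp only [hi]
      norm_num
    rw [hgre]
    simp [pvDig]

lemma pvPopB_spec (st : List Int) : ∀ (dd v : Int),
    ∃ j ≤ st.length, pvPopB st dd v = (st.drop j, dd - j) ∧ ((0:Int) ≤ dd → (j:Int) ≤ dd) := by
  induction st with
  | nil => intro dd v; exact ⟨0, by simp, by simp [pvPopB], by simp⟩
  | cons t s ih =>
    intro dd v
    by_cases h : dd > 0 ∧ t < v
    · obtain ⟨j, hj, heq, hjd⟩ := ih (dd - 1) v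
      refine ⟨j + 1, by simp; omega, ?_, ?_⟩
      · rw [pvPopB, if_pos h, heq, List.drop_succ_cons]
        congr 1
        push_cast
        ring
      · intro _
        have := hjd (by omega)
        push_cast
        omega
    · exact ⟨0, by simp, by rw [pvPopB, if_neg h]; simp, by simp⟩

lemma pvPopB_all (st : List Int) {v : Int} : ∀ (dd : Int),
    (∀ y ∈ st, y < v) → (st.length : Int) ≤ dd → pvPopB st dd v = ([], dd - st.length) := by
  induction st with
  | nil => intro dd _ _; simp [pvPopB]
  | cons t s ih =>
    intro dd hall hlen
    simp only [List.length_cons] at hlen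
    rw [pvPopB, if_pos ⟨by push_cast at hlen ⊢; omega, hall t (by simp)⟩]
    rw [ih (dd - 1) (fun y hy => hall y (by simp [hy])) (by push_cast at hlen ⊢; omega)]
    simp only [List.length_cons]
    congr 1
    push_cast
    ring

lemma pvPopB_bot (st : List Int) {b : Int} : ∀ (dd v : Int), (b < v → dd ≤ (st.length : Int)) →
    pvPopB (st ++ [b]) dd v = ((pvPopB st dd v).1 ++ [b], (pvPopB st dd v).2) := by
  induction st with
  | nil =>
    intro dd v hb
    rw [List.nil_append, pvPopB, pvPopB]
    rw [if_neg ?_]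
    · simp
    · rintro ⟨h1, h2⟩
      have := hb h2
      simp at this
      omega
  | cons t s ih =>
    intro dd v hb
    rw [List.cons_append, pvPopB, pvPopB]
    by_cases h : dd > 0 ∧ t < v
    · rw [if_pos h, if_pos h, ih (dd - 1) v (fun hv => by have := hb hv; simp at this ⊢; omega)]
    · rw [if_neg h, if_neg h]; simp

lemma pvLemBot (ys : List Int) : ∀ (b : Int) (st : List Int) (db : Int),
    (∀ (j : Nat), (hj : j < ys.length) → b < ys[j] → db ≤ (st.length : Int) + j) →
    ys.foldl pvStepB (st ++ [b], db) =
      ((ys.foldl pvStepB (st, db)).1 ++ [b], (ys.foldl pvStepB (st, db)).2) := by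
  induction ys with
  | nil => intro b st db _; simp
  | cons v ys ih =>
    intro b st db hyp
    rw [List.foldl_cons, List.foldl_cons]
    have hb : b < v → db ≤ (st.length : Int) := by
      intro hv
      have := hyp 0 (by simp) (by simpa using hv)
      simpa using this
    have hstep : pvStepB (st ++ [b], db) v =
        ((pvStepB (st, db) v).1 ++ [b], (pvStepB (st, db) v).2) := by
      show (v :: (pvPopB (st ++ [b]) db v).1, (pvPopB (st ++ [b]) db v).2) = _
      rw [pvPopB_bot st db v hb]
      simp [pvStepB]
    rw [hstep]
    obtain ⟨j0, hj0, hpop, _⟩ := pvPopB_spec st db v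
    have hstv : pvStepB (st, db) v = (v :: st.drop j0, db - j0) := by
      show (v :: (pvPopB st db v).1, (pvPopB st db v).2) = _
      rw [hpop]
    rw [hstv]
    exact ih b (v :: st.drop j0) (db - j0) (by
      intro j hj hbj
      have := hyp (j + 1) (by simpa using hj) (by simpa using hbj)
      simp only [List.length_cons, List.length_drop] at this ⊢
      push_cast at this ⊢
      omega)

lemma pvLemC (pre : List Int) {m : Int} (ys : List Int) : ∀ (st : List Int) (dd : Int),
    (∀ y ∈ st, y < m) → (∀ y ∈ pre, y < m) → (st.length : Int) + pre.length ≤ dd →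
    (pre ++ m :: ys).foldl pvStepB (st, dd) =
      ys.foldl pvStepB ([m], dd - st.length - pre.length) := by
  induction pre with
  | nil =>
    intro st dd hst _ hlen
    rw [List.nil_append, List.foldl_cons]
    have : pvStepB (st, dd) m = ([m], dd - st.length) := by
      show (m :: (pvPopB st dd m).1, (pvPopB st dd m).2) = _
      rw [pvPopB_all st dd hst (by simpa using hlen)]
    rw [this]
    norm_num
  | cons p pre' ih =>
    intro st dd hst hpre hlen
    rw [List.cons_append, List.foldl_cons]
    obtain ⟨j0, hj0, hpop, _⟩ := pvPopB_spec st dd p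
    have hstv : pvStepB (st, dd) p = (p :: st.drop j0, dd - j0) := by
      show (p :: (pvPopB st dd p).1, (pvPopB st dd p).2) = _
      rw [hpop]
    rw [hstv]
    have hres := ih (p :: st.drop j0) (dd - j0)
      (by
        intro y hy
        rcases List.mem_cons.mp hy with hy | hy
        · exact hy ▸ hpre p (by simp)
        · exact hst y (List.mem_of_mem_drop hy))
      (fun y hy => hpre y (by simp [hy]))
      (by
        simp only [List.length_cons, List.length_drop] at *
        push_cast at hlen ⊢
        omega)
    rw [hres]
    have harith : dd - (j0:Int) - ((p :: st.drop j0).length : Int) - (pre'.length : Int) =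
        dd - (st.length : Int) - (((p :: pre').length : Int)) := by
      simp only [List.length_cons, List.length_drop]
      push_cast [Nat.cast_sub hj0]
      ring
    rw [harith]

lemma pvLemB : ∀ (k : Nat) (xs : List Int), k ≤ xs.length →
    ((xs.foldl pvStepB ([], (xs.length : Int) - k)).1.reverse).take k = pvGre xs k := by
  intro k
  induction k with
  | zero => intro xs _; simp [pvGre]
  | succ k ih =>
    intro xs hlen
    have hwne : xs.take (xs.length - k) ≠ [] := by
      intro hcon
      rcases List.take_eq_nil_iff.mp hcon with h | h
      · omega
      · subst h; simp at hlen
    obtain ⟨⟨i, m⟩, hfam⟩ := pvFam_isSome hwne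
    obtain ⟨pre, suf, hw, hi, hpre, hmax⟩ := pvFam_spec hfam
    have hwlen : (xs.take (xs.length - k)).length = xs.length - k := by
      rw [List.length_take]; omega
    have hplen : pre.length + 1 ≤ xs.length - k := by
      have h2 : pre.length < (xs.take (xs.length - k)).length := by rw [hw]; simp
      omega
    have hsuflen : suf.length = xs.length - k - pre.length - 1 := by
      have := hwlen
      rw [hw] at this
      simp at this
      omega
    have E : xs = pre ++ m :: (suf ++ xs.drop (xs.length - k)) := by
      conv_lhs => rw [← List.take_append_drop (xs.length - k) xs]
      rw [hw]; simp
    have hyslen : (suf ++ xs.drop (xs.length - k)).length = xs.length - pre.length - 1 := by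
      rw [List.length_append, List.length_drop]
      omega
    have hys_drop : xs.drop (pre.length + 1) = suf ++ xs.drop (xs.length - k) := by
      conv_lhs => rw [E]
      rw [show pre ++ m :: (suf ++ xs.drop (xs.length - k)) =
            (pre ++ [m]) ++ (suf ++ xs.drop (xs.length - k)) by simp]
      rw [show pre.length + 1 = (pre ++ [m]).length by simp]
      exact List.drop_left
    set ys := suf ++ xs.drop (xs.length - k) with hysdef
    -- step 1: consume pre ++ [m]
    have hdd : ((xs.length : Int) - ((k:Int)+1)) - 0 - pre.length = (ys.length : Int) - k := by
      rw [hyslen]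
      push_cast [Nat.cast_sub (by omega : pre.length + 1 ≤ xs.length)]
      omega
    have step1 : (pre ++ m :: ys).foldl pvStepB ([], (xs.length : Int) - ((k:Int)+1)) =
        ys.foldl pvStepB ([m], (ys.length : Int) - k) := by
      rw [pvLemC pre ys [] ((xs.length : Int) - ((k:Int)+1))
        (by simp) hpre (by simp; push_cast; omega)]
      rw [show (([] : List Int).length : Int) = 0 by simp, hdd]
    -- step 2: the bottom m survives
    have step2 : ys.foldl pvStepB ([m], (ys.length : Int) - k) =
        ((ys.foldl pvStepB ([], (ys.length : Int) - k)).1 ++ [m],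
         (ys.foldl pvStepB ([], (ys.length : Int) - k)).2) := by
      rw [show ([m] : List Int) = [] ++ [m] by simp]
      apply pvLemBot
      intro j hj hmj
      simp only [List.length_nil, Nat.cast_zero]
      by_contra hcon
      have hjlt : j < suf.length := by
        rw [hyslen] at hj
        simp only [not_le] at hcon
        omega
      have hget : ys[j] = suf[j]'hjlt := List.getElem_append_left hjlt
      have hmem : suf[j]'hjlt ∈ xs.take (xs.length - k) := by
        rw [hw]
        exact List.mem_append_right _ (List.mem_cons_of_mem _ (List.getElem_mem hjlt))
      have := hmax _ hmem
      rw [hget] at hmj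
      omega
    -- assemble
    rw [show ((k+1 : Nat) : Int) = (k:Int)+1 by push_cast; ring]
    conv_lhs => rw [E]
    rw [show (((pre ++ m :: ys).length : Int)) = (xs.length : Int) by rw [← E]]
    rw [step1, step2]
    simp only [List.reverse_append, List.reverse_cons, List.reverse_nil, List.nil_append,
      List.singleton_append, List.take_succ_cons]
    have hk' : k ≤ ys.length := by rw [hyslen]; omega
    rw [ih ys hk']
    -- right-hand side
    have hgre : pvGre xs (k+1) = m :: pvGre (xs.drop (pre.length + 1)) k := by
      show (match pvFam (xs.take (xs.length - k)) with
            | none => []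
            | some (i, m) => m :: pvGre (xs.drop (i.toNat + 1)) k) = _
      rw [hfam]
      simp only [hi]
      norm_num
    rw [hgre, hys_drop]

-- the final stack is long enough: each pvStepB step raises length - drop by exactly 1,
-- and drop never goes below 0
lemma pvStack_len (xs : List Int) : ∀ (st : List Int) (dd : Int), 0 ≤ dd →
    0 ≤ (xs.foldl pvStepB (st, dd)).2 ∧
    ((xs.foldl pvStepB (st, dd)).1.length : Int) - (xs.foldl pvStepB (st, dd)).2 =
      (st.length : Int) - dd + xs.length := by
  induction xs with
  | nil => intro st dd hdd; simp [hdd]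
  | cons v xs ih =>
    intro st dd hdd
    rw [List.foldl_cons]
    obtain ⟨j0, hj0, hpop, hjd⟩ := pvPopB_spec st dd v
    have hstv : pvStepB (st, dd) v = (v :: st.drop j0, dd - j0) := by
      show (v :: (pvPopB st dd v).1, (pvPopB st dd v).2) = _
      rw [hpop]
    rw [hstv]
    obtain ⟨ha, hb⟩ := ih (v :: st.drop j0) (dd - j0) (by have := hjd hdd; omega)
    refine ⟨ha, ?_⟩
    rw [hb]
    simp only [List.length_cons, List.length_drop]
    push_cast [Nat.cast_sub hj0]
    ring

-- the index-reading loop 'for i in range(k): out = 10*out + l[i]' equals folding over take k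
lemma pvFoldIdx (l : List Int) : ∀ (k : Nat), k ≤ l.length →
    (PySem.List.pyRange 0 (k : Int) 1).foldl (fun out i => 10 * out + PySem.List.pyGetD l i 0) 0 =
      pvDig 0 (l.take k) := by
  intro k
  induction k with
  | zero => intro _; simp [PySem.List.pyRange_one_eq_nil, pvDig]
  | succ k ih =>
    intro hlen
    rw [show ((k+1 : Nat) : Int) = (k:Int)+1 by push_cast; ring]
    rw [PySem.List.pyRange_one_succ_right (by positivity), List.foldl_append, ih (by omega)]
    have hk : k < l.length := by omega
    rw [List.foldl_cons, List.foldl_nil, PySem.List.pyGetD_natCast]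
    have hstep : List.take (k+1) l = List.take k l ++ [l[k]] := by
      rw [List.take_add_one, List.getElem?_eq_getElem hk, Option.toList_some]
    simp only [pvDig]
    conv_rhs => rw [hstep]
    rw [List.foldl_append, List.foldl_cons, List.foldl_nil]
    congr 1
    simp [List.getD, List.getElem?_eq_getElem hk]

-- A = B on the whole precondition
lemma pvMain : ∀ (bank : List Int) (n : Int), (n ≤ 0 ∨ n ≤ (bank.length : Int)) →
    smart_max_joltage bank n = smart_max_joltage_alt bank n := by
  intro bank n hpre
  by_cases hn : n ≤ 0
  · unfold smart_max_joltage smart_max_joltage_alt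
    rw [PySem.List.pyRange_neg_one_eq_nil hn, if_pos hn]
    rfl
  · have h1 : 1 ≤ n := by omega
    have hnlen : n ≤ (bank.length : Int) := by rcases hpre with h | h; omega; exact h
    set k := n.toNat with hkdef
    have hk : (k : Int) = n := Int.toNat_of_nonneg (by omega)
    have hklen : k ≤ bank.length := by omega
    obtain ⟨rest, hrec⟩ := pvLemA k bank 0 hklen
    unfold smart_max_joltage smart_max_joltage_alt
    rw [← hk, hrec, if_neg (by rw [← hk] at hn; exact hn)]
    simp only []
    set fin := bank.foldl pvStepB ([], (bank.length : Int) - (k:Int)) with hfin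
    obtain ⟨hnn, hlenEq⟩ := pvStack_len bank [] ((bank.length : Int) - (k:Int)) (by omega)
    have hkfin : k ≤ fin.1.reverse.length := by
      rw [List.length_reverse]
      rw [← hfin] at hnn hlenEq
      simp only [List.length_nil, Nat.cast_zero] at hlenEq
      omega
    rw [pvFoldIdx fin.1.reverse k hkfin]
    rw [pvLemB k bank hklen]

-- ===== VERDICT (by name: the statement is the Claim_ definition above) =====
theorem smart_max_joltage_spec : Claim_equal_smart_max_joltage := by
  intro bank n _ hpre
  unfold Spec_smart_max_joltage
  exact pvMain bank n hpre
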